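-- pv_equiv track=rewrite | github.com/Lafa2K/blender-ytd-generator | s27_ytd_manager/utils.py | get_mip_level_count
-- ===== SOURCE A (Python) =====
-- def is_power_of_two(value: int) -> bool:
--     value = int(value or 0)
--     return value > 0 and (value & (value - 1)) == 0
--
-- def uses_single_mip_level(width: int, height: int) -> bool:
--     width = int(width or 0)
--     height = int(height or 0)
--     if width <= 0 or height <= 0:
--         return True
--     return not (is_power_of_two(width) and is_power_of_two(height))
--
-- def get_mip_level_count(width: int, height: int) -> int:
--     width = max(1, int(width or 1))
--     height = max(1, int(height or 1))
--
--     if uses_single_mip_level(width, height):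
--         return 1
--
--     levels = 1
--     while width > 1 or height > 1:
--         width = max(1, width // 2)
--         height = max(1, height // 2)
--         levels += 1
--     return levels
-- ===== SOURCE B (Python) =====
-- def is_power_of_two(value: int) -> bool:
--     value = int(value or 0)
--     return value > 0 and (value & (value - 1)) == 0
--
-- def get_mip_level_count(width: int, height: int) -> int:
--     width = max(1, int(width or 1))
--     height = max(1, int(height or 1))
--     if not (is_power_of_two(width) and is_power_of_two(height)):
--         return 1
--     # both are powers of two >= 1: floor(log2(max)) + 1 levels
--     return max(width, height).bit_length()
-- ===== Notes on version B (the rewrite author's own statement) =====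
-- stated objective: simpler
-- what changed: Replaces the halving while-loop with a closed form: after the power-of-two guard, the level count is max(width, height).bit_length(), i.e. floor(log2)+1 of the larger dimension.
import Mathlib
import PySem

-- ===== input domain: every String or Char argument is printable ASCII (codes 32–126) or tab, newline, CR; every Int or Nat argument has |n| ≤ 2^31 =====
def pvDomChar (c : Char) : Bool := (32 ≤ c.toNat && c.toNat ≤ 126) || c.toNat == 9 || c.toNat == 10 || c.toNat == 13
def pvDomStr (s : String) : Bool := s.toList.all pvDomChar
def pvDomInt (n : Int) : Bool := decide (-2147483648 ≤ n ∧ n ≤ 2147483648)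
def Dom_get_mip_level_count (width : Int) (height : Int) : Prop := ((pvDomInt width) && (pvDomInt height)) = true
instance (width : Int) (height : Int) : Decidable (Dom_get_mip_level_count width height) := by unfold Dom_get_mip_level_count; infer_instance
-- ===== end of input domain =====

-- B replaces A's halving while-loop by a closed form (bit_length of the larger
-- dimension) after the same power-of-two guard; objective: simpler.

-- ===== PORT A =====
-- helper is_power_of_two, shared by both ports (Source B keeps the identical helper)
def pv_is_power_of_two (value : Int) : Bool :=
  -- value = int(value or 0)
  let value : Int := if value = 0 then 0 else value
  decide (value > 0) && decide (PySem.Int.band value (value - 1) = 0)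

def pv_uses_single_mip_level (width : Int) (height : Int) : Bool :=
  let width : Int := if width = 0 then 0 else width
  let height : Int := if height = 0 then 0 else height
  if width ≤ 0 || height ≤ 0 then true
  else !(pv_is_power_of_two width && pv_is_power_of_two height)

-- the while-loop of A: while width > 1 or height > 1: halve (clamped at 1), count.
-- structural recursion on a fuel bound; fuel = (max 1 w).toNat + (max 1 h).toNat at the
-- call site always suffices (each iteration strictly decreases that sum), so this is
-- exact for A's loop on every input.
def pvLoopA (fuel : Nat) (levels : Int) (width : Int) (height : Int) : Int :=
  match fuel with
  | 0 => levels
  | fuel + 1 =>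
    if width > 1 || height > 1 then
      pvLoopA fuel (levels + 1) (max 1 (PySem.Int.floordiv width 2)) (max 1 (PySem.Int.floordiv height 2))
    else levels

def get_mip_level_count (width : Int) (height : Int) : Int :=
  let width : Int := max 1 (if width = 0 then 1 else width)
  let height : Int := max 1 (if height = 0 then 1 else height)
  if pv_uses_single_mip_level width height then 1
  else pvLoopA ((max 1 width).toNat + (max 1 height).toNat) 1 width height

-- ===== PORT B =====
def get_mip_level_count_alt (width : Int) (height : Int) : Int :=
  let width : Int := max 1 (if width = 0 then 1 else width)
  let height : Int := max 1 (if height = 0 then 1 else height)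
  if !(pv_is_power_of_two width && pv_is_power_of_two height) then 1
  else (PySem.Int.bitLength (max width height) : Int)

-- ===== PRECONDITION & SPEC =====
def Spec_get_mip_level_count (width : Int) (height : Int) (out : Int) : Prop := out = get_mip_level_count_alt width height
instance (width : Int) (height : Int) (out : Int) : Decidable (Spec_get_mip_level_count width height out) := by unfold Spec_get_mip_level_count; infer_instance

-- ===== CLAIM (what is proved, stated in full; the proofs are below) =====
def Claim_equal_get_mip_level_count : Prop := ∀ (width : Int) (height : Int), Dom_get_mip_level_count width height → Spec_get_mip_level_count width height (get_mip_level_count width height)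

-- ===== LEMMAS AND PROOFS =====

-- floor division by 2 is monotone
theorem pv_fdiv2_mono {a b : Int} (h : a ≤ b) :
    PySem.Int.floordiv a 2 ≤ PySem.Int.floordiv b 2 := by
  rw [PySem.Int.floordiv_eq_ediv_of_pos (by omega), PySem.Int.floordiv_eq_ediv_of_pos (by omega)]
  exact Int.ediv_le_ediv (by omega) h

-- one halving step on the larger dimension
theorem pv_step_max (w h : Int) :
    max (max 1 (PySem.Int.floordiv w 2)) (max 1 (PySem.Int.floordiv h 2))
      = max 1 (PySem.Int.floordiv (max w h) 2) := by
  rcases le_total w h with hle | hle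
  · rw [max_eq_right hle, max_eq_right (max_le_max le_rfl (pv_fdiv2_mono hle))]
  · rw [max_eq_left hle, max_eq_left (max_le_max le_rfl (pv_fdiv2_mono hle))]

-- with sufficient fuel the loop counts exactly bitLength (max w h) - 1 further halvings
theorem pvLoopA_eq (fuel : Nat) : ∀ (levels w h : Int), 1 ≤ w → 1 ≤ h →
    w.toNat + h.toNat ≤ fuel + 2 →
    pvLoopA fuel levels w h = levels + (PySem.Int.bitLength (max w h) : Int) - 1 := by
  induction fuel with
  | zero =>
    intro levels w h hw hh hf
    have hw1 : w = 1 := by omega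
    have hh1 : h = 1 := by omega
    subst hw1 hh1
    have hb1 : PySem.Int.bitLength (max (1:Int) 1) = 1 := by decide
    rw [pvLoopA, hb1]
    push_cast; ring
  | succ fuel ih =>
    intro levels w h hw hh hf
    rw [pvLoopA]
    by_cases hc : (1 : Int) < w ∨ (1 : Int) < h
    · rw [if_pos (by simp only [Bool.or_eq_true, decide_eq_true_eq]; exact hc)]
      have hfw : PySem.Int.floordiv w 2 = w / 2 := PySem.Int.floordiv_eq_ediv_of_pos (by omega)
      have hfh : PySem.Int.floordiv h 2 = h / 2 := PySem.Int.floordiv_eq_ediv_of_pos (by omega)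
      have hm2 : (2 : Int) ≤ max w h := by omega
      have hfm : PySem.Int.floordiv (max w h) 2 = (max w h) / 2 :=
        PySem.Int.floordiv_eq_ediv_of_pos (by omega)
      have h1f : (1 : Int) ≤ PySem.Int.floordiv (max w h) 2 := by rw [hfm]; omega
      rw [ih (levels + 1) _ _ (le_max_left _ _) (le_max_left _ _) (by rw [hfw, hfh]; omega),
        pv_step_max, max_eq_right h1f,
        PySem.Int.bitLength_of_pos (n := max w h) (by omega)]
      push_cast; ring
    · rw [if_neg (by simp only [Bool.or_eq_true, decide_eq_true_eq]; exact hc)]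
      have hw1 : w = 1 := by omega
      have hh1 : h = 1 := by omega
      subst hw1 hh1
      have hb1 : PySem.Int.bitLength (max (1:Int) 1) = 1 := by decide
      rw [hb1]; push_cast; ring

theorem pv_branch_eq (w h : Int) (hw : 1 ≤ w) (hh : 1 ≤ h) :
    (if pv_uses_single_mip_level w h then (1 : Int) else pvLoopA ((max 1 w).toNat + (max 1 h).toNat) 1 w h)
      = (if !(pv_is_power_of_two w && pv_is_power_of_two h) then (1 : Int)
         else (PySem.Int.bitLength (max w h) : Int)) := by
  have hg : pv_uses_single_mip_level w h
      = !(pv_is_power_of_two w && pv_is_power_of_two h) := by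
    unfold pv_uses_single_mip_level
    rw [if_neg (show ¬ w = 0 by omega), if_neg (show ¬ h = 0 by omega)]
    rw [if_neg (by simp only [Bool.or_eq_true, decide_eq_true_eq, not_or, not_le]; omega)]
  rw [hg]
  by_cases hp : (pv_is_power_of_two w && pv_is_power_of_two h) = true
  · rw [hp]
    simp only [Bool.not_true, if_neg (by simp : ¬ false = true)]
    rw [pvLoopA_eq _ 1 w h hw hh (by omega)]
    ring
  · rw [Bool.not_eq_true] at hp
    rw [hp]
    simp

theorem get_mip_level_count_eq (width height : Int) :
    get_mip_level_count width height = get_mip_level_count_alt width height := by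
  unfold get_mip_level_count get_mip_level_count_alt
  exact pv_branch_eq _ _ (le_max_left _ _) (le_max_left _ _)

-- ===== VERDICT (by name: the statement is the Claim_ definition above) =====
theorem get_mip_level_count_spec : Claim_equal_get_mip_level_count := by
  intro width height _
  unfold Spec_get_mip_level_count
  exact get_mip_level_count_eq width height
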